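-- pv_equiv track=rewrite | github.com/overparser/pinnacle | Parser/parser.py | join_price_info
-- ===== SOURCE A (Python) =====
-- def join_price_info(price_objects: list, info_objects: list) -> list:
--     """:returns joined price_obj and info_obj"""
--     price_objects = price_objects if isinstance(price_objects, list) else []
--     info_objects = info_objects if isinstance(info_objects, list) else []
--     matchups_list = []
--     for price_obj in price_objects:
--         for info_obj in info_objects:
--             if 'id' not in info_obj or 'matchupId' not in price_obj:
--                 continue
--             if info_obj['id'] == price_obj['matchupId']:
--                 price_obj.update(info_obj)
--                 matchups_list.append(price_obj)
--                 break
--     return matchups_list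
-- ===== SOURCE B (Python) =====
-- def join_price_info(price_objects: list, info_objects: list) -> list:
--     """:returns joined price_obj and info_obj (bucket join driven from the info side)"""
--     price_objects = price_objects if isinstance(price_objects, list) else []
--     info_objects = info_objects if isinstance(info_objects, list) else []
--     # bucket the price objects by matchupId, remembering their positions
--     buckets = {}
--     for pos, price_obj in enumerate(price_objects):
--         if 'matchupId' in price_obj:
--             buckets.setdefault(price_obj['matchupId'], []).append((pos, price_obj))
--     # one pass over info_objects: the first info with a given id claims its whole bucket
--     seen = set()
--     out = []
--     for info_obj in info_objects:
--         if 'id' in info_obj: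
--             iid = info_obj['id']
--             plist = buckets.get(iid, [])
--             if plist and iid not in seen:
--                 seen.add(iid)
--                 for pos, price_obj in plist:
--                     price_obj.update(info_obj)
--                     out.append((pos, price_obj))
--     # restore the original price order
--     out.sort(key=lambda t: t[0])
--     return [price_obj for _, price_obj in out]
-- ===== Notes on version B (the rewrite author's own statement) =====
-- stated objective: alternative
-- what changed: Inverts the join: B buckets price_objects by matchupId with their positions, makes a single pass over info_objects in which the first info per id claims and merges its whole bucket, then re-sorts the collected pairs by original position, instead of A's rescan of info_objects for every price_obj.
import Mathlib
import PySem

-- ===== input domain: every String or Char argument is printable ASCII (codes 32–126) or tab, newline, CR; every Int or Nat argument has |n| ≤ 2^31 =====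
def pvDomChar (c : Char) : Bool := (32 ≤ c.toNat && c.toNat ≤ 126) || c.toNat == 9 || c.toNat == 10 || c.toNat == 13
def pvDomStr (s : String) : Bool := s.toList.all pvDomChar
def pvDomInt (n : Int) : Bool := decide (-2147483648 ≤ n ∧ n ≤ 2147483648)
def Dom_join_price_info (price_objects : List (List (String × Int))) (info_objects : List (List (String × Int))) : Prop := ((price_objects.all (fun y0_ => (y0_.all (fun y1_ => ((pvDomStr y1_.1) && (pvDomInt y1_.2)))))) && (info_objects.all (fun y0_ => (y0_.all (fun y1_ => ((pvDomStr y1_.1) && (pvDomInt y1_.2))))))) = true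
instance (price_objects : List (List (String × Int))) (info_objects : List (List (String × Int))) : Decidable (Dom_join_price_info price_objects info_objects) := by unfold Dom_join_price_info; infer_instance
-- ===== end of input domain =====

-- B inverts A's nested-scan join: it buckets price_objects by matchupId, makes one pass over info_objects in which the first info per id claims and merges its whole bucket, and re-sorts by original position (an alternative join algorithm); the equivalence is about the RETURN value (both Pythons mutate the matched price dicts in place identically).


-- ===== PORT A =====
-- inner 'for info_obj in info_objects: … break' loop of A: first matching info_obj,
-- already merged into price_obj (price_obj.update(info_obj))
def joinInnerA (p : PySem.Dict String Int) :
    List (PySem.Dict String Int) → Option (PySem.Dict String Int)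
  | [] => none
  | info :: rest =>
    if !(info.contains "id") || !(p.contains "matchupId") then joinInnerA p rest
    else if info.getD "id" 0 == p.getD "matchupId" 0 then some (p.update info.items)
    else joinInnerA p rest

def join_price_info (price_objects : List (List (String × Int))) (info_objects : List (List (String × Int))) : List (List (String × Int)) :=
  let infos := info_objects.map PySem.Dict.ofList
  (((price_objects.map PySem.Dict.ofList).foldl (fun acc p =>
      match joinInnerA p infos with
      | some merged => acc ++ [merged]
      | none => acc) []).map (·.items))

-- ===== PORT B =====
def join_price_info_alt (price_objects : List (List (String × Int))) (info_objects : List (List (String × Int))) : List (List (String × Int)) :=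
  let priceDicts := price_objects.map PySem.Dict.ofList
  let infoDicts := info_objects.map PySem.Dict.ofList
  -- bucket the price objects by matchupId, remembering their positions
  let buckets := (PySem.List.enumerate priceDicts).foldl
      (fun d q => if q.2.contains "matchupId" then
          d.modify (q.2.getD "matchupId" 0) [] (· ++ [q]) else d)
      PySem.Dict.empty
  -- one pass over info_objects: the first info with a given id claims its whole bucket
  let st := infoDicts.foldl (fun st info =>
      if info.contains "id" then
        let v := info.getD "id" 0
        let pl := buckets.getD v []
        if !pl.isEmpty && !(PySem.Set.contains st.1 v) then
          (PySem.Set.add st.1 v, st.2 ++ pl.map (fun q => (q.1, q.2.update info.items)))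
        else st
      else st)
    ((PySem.Set.empty : PySem.Set Int), ([] : List (Int × PySem.Dict String Int)))
  -- restore the original price order
  ((PySem.List.sorted st.2 (fun q => q.1) false).map (·.2)).map (·.items)

-- ===== PRECONDITION & SPEC =====
def Spec_join_price_info (price_objects : List (List (String × Int))) (info_objects : List (List (String × Int))) (out : List (List (String × Int))) : Prop := out = join_price_info_alt price_objects info_objects
instance (price_objects : List (List (String × Int))) (info_objects : List (List (String × Int))) (out : List (List (String × Int))) : Decidable (Spec_join_price_info price_objects info_objects out) := by unfold Spec_join_price_info; infer_instance

-- ===== CLAIM (what is proved, stated in full; the proofs are below) =====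
def Claim_equal_join_price_info : Prop := ∀ (price_objects : List (List (String × Int))) (info_objects : List (List (String × Int))), Dom_join_price_info price_objects info_objects → Spec_join_price_info price_objects info_objects (join_price_info price_objects info_objects)


-- ===== LEMMAS AND PROOFS =====

-- first info dict whose 'id' value is v (proof-only characterisation of both sides)
def joinScan (v : Int) : List (PySem.Dict String Int) → Option (PySem.Dict String Int)
  | [] => none
  | info :: rest =>
    if info.contains "id" && info.getD "id" 0 == v then some info else joinScan v rest

-- the price objects that carry a 'matchupId', keyed by it, with their positions
def keyedP (ps : List (PySem.Dict String Int)) : List (Int × Int × PySem.Dict String Int) :=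
  (PySem.List.enumerate ps).filterMap
    (fun q => if q.2.contains "matchupId" then some (q.2.getD "matchupId" 0, q) else none)

-- the (position, merged dict) list both sides produce, in price order
def joinLA (infos : List (PySem.Dict String Int)) (ps : List (PySem.Dict String Int)) :
    List (Int × PySem.Dict String Int) :=
  (keyedP ps).filterMap
    (fun p => (joinScan p.1 infos).map (fun info => (p.2.1, p.2.2.update info.items)))

-- recursion mirroring B's info loop
def outRecB (bk : PySem.Dict Int (List (Int × PySem.Dict String Int))) :
    List (PySem.Dict String Int) → PySem.Set Int → List (Int × PySem.Dict String Int)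
  | [], _ => []
  | info :: rest, s =>
    if info.contains "id" then
      if !(bk.getD (info.getD "id" 0) []).isEmpty
          && !(PySem.Set.contains s (info.getD "id" 0)) then
        (bk.getD (info.getD "id" 0) []).map (fun q => (q.1, q.2.update info.items))
          ++ outRecB bk rest (PySem.Set.add s (info.getD "id" 0))
      else outRecB bk rest s
    else outRecB bk rest s

-- ---- A-side characterisation ----

lemma joinInnerA_eq (p : PySem.Dict String Int) (infos : List (PySem.Dict String Int)) :
    joinInnerA p infos
      = if p.contains "matchupId" then
          (joinScan (p.getD "matchupId" 0) infos).map (fun info => p.update info.items)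
        else none := by
  induction infos with
  | nil => cases h : p.contains "matchupId" <;> simp [joinInnerA, joinScan, h]
  | cons info rest ih =>
    cases h : p.contains "matchupId" with
    | false => simp [joinInnerA, h, ih]
    | true =>
      by_cases hid : info.contains "id" = true
      · by_cases hv : info.getD "id" 0 = p.getD "matchupId" 0
        · simp [joinInnerA, joinScan, h, hid, hv]
        · simp [joinInnerA, joinScan, h, hid, hv, ih]
      · simp [joinInnerA, joinScan, h, Bool.eq_false_iff.mpr hid, ih]

lemma A_foldl (infos ps : List (PySem.Dict String Int))
    (acc : List (PySem.Dict String Int)) :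
    ps.foldl (fun acc p =>
      match joinInnerA p infos with
      | some merged => acc ++ [merged]
      | none => acc) acc
      = acc ++ ps.filterMap (fun p => joinInnerA p infos) := by
  induction ps generalizing acc with
  | nil => simp
  | cons x xs ih =>
    cases hx : joinInnerA x infos <;> simp [List.filterMap_cons, hx, ih]

lemma filterMap_enumerate_snd {α β : Type} (F : α → Option β) (ps : List α) (s : Int) :
    ((PySem.List.enumerate ps s).filterMap
        (fun q => (F q.2).map (fun y => (q.1, y)))).map (·.2)
      = ps.filterMap F := by
  induction ps generalizing s with
  | nil => simp [PySem.List.enumerate]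
  | cons p rest ih =>
    cases hF : F p <;> simp [PySem.List.enumerate_cons, hF, ih]

lemma A_characterisation (ps infos : List (PySem.Dict String Int)) :
    (ps.foldl (fun acc p =>
      match joinInnerA p infos with
      | some merged => acc ++ [merged]
      | none => acc) [])
      = (joinLA infos ps).map (·.2) := by
  rw [A_foldl, List.nil_append]
  unfold joinLA keyedP
  rw [List.filterMap_filterMap]
  rw [← filterMap_enumerate_snd (fun p => joinInnerA p infos) ps 0]
  congr 1
  apply List.filterMap_congr
  intro q _
  rw [joinInnerA_eq]
  by_cases h : q.2.contains "matchupId" = true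
  · simp only [h, if_true]
    cases hs : joinScan (q.2.getD "matchupId" 0) infos <;> simp [h, hs]
  · simp [h]

-- ---- B-side characterisation ----

lemma buckets_foldl {α : Type} (c : α → Bool) (k : α → Int) (l : List α)
    (d : PySem.Dict Int (List α)) :
    l.foldl (fun d q => if c q then d.modify (k q) [] (· ++ [q]) else d) d
      = (l.filterMap (fun q => if c q then some (k q, q) else none)).foldl
          (fun d p => d.modify p.1 [] (· ++ [p.2])) d := by
  induction l generalizing d with
  | nil => rfl
  | cons x xs ih =>
    by_cases hx : c x = true <;> simp [List.filterMap_cons, hx, ih]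

lemma buckets_getD (ps : List (PySem.Dict String Int)) (v : Int) :
    ((PySem.List.enumerate ps).foldl
      (fun d q => if q.2.contains "matchupId" then
          d.modify (q.2.getD "matchupId" 0) [] (· ++ [q]) else d)
      PySem.Dict.empty).getD v []
      = ((keyedP ps).filter (fun p => p.1 == v)).map (·.2) := by
  rw [buckets_foldl, PySem.Dict.getD_foldl_modify_append]
  simp [keyedP]

lemma foldl_outRecB (bk : PySem.Dict Int (List (Int × PySem.Dict String Int)))
    (infos : List (PySem.Dict String Int)) (s : PySem.Set Int)
    (acc : List (Int × PySem.Dict String Int)) :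
    (infos.foldl (fun st info =>
      if info.contains "id" then
        let v := info.getD "id" 0
        let pl := bk.getD v []
        if !pl.isEmpty && !(PySem.Set.contains st.1 v) then
          (PySem.Set.add st.1 v, st.2 ++ pl.map (fun q => (q.1, q.2.update info.items)))
        else st
      else st) (s, acc)).2
      = acc ++ outRecB bk infos s := by
  induction infos generalizing s acc with
  | nil => simp [outRecB]
  | cons info rest ih =>
    by_cases hid : info.contains "id" = true
    · by_cases hc : (!(bk.getD (info.getD "id" 0) []).isEmpty
          && !(PySem.Set.contains s (info.getD "id" 0))) = true
      · simp only [List.foldl_cons, outRecB, hid, if_true, hc]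
        rw [ih]
        simp [List.append_assoc]
      · simp only [List.foldl_cons, outRecB, hid, if_true, hc, if_false]
        rw [ih]
        simp [hc]
    · simp only [List.foldl_cons, outRecB, hid]
      simp only [Bool.false_eq_true, if_false]
      exact ih s acc

lemma joinScan_skip (v : Int) (info : PySem.Dict String Int)
    (rest : List (PySem.Dict String Int))
    (h : ¬ (info.contains "id" = true ∧ info.getD "id" 0 = v)) :
    joinScan v (info :: rest) = joinScan v rest := by
  have hb : (info.contains "id" && info.getD "id" 0 == v) = false := by
    cases hc : info.contains "id"
    · simp
    · have : ¬ info.getD "id" 0 = v := fun hv => h ⟨hc, hv⟩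
      simp [this]
  simp [joinScan, hb]

lemma filterMap_some_eq_map {α β : Type} (g : α → β) (l : List α) :
    l.filterMap (fun x => some (g x)) = l.map g := by
  induction l with
  | nil => rfl
  | cons x xs ih => simp [List.filterMap_cons, ih]

lemma contains_add_eq (s : PySem.Set Int) (w x : Int) :
    PySem.Set.contains (PySem.Set.add s w) x = (PySem.Set.contains s x || x == w) := by
  rw [Bool.eq_iff_iff]
  simp [PySem.Set.contains_iff, PySem.Set.mem_add]

lemma outRecB_perm (ps : List (PySem.Dict String Int))
    (bk : PySem.Dict Int (List (Int × PySem.Dict String Int)))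
    (hbk : ∀ v, bk.getD v [] = ((keyedP ps).filter (fun p => p.1 == v)).map (·.2))
    (infos : List (PySem.Dict String Int)) (s : PySem.Set Int) :
    (outRecB bk infos s).Perm
      (((keyedP ps).filter (fun p => !(PySem.Set.contains s p.1))).filterMap
        (fun p => (joinScan p.1 infos).map (fun info => (p.2.1, p.2.2.update info.items)))) := by
  induction infos generalizing s with
  | nil =>
    simp [outRecB, joinScan]
  | cons info rest ih =>
    by_cases hid : info.contains "id" = true
    · by_cases hc : (!(bk.getD (info.getD "id" 0) []).isEmpty
          && !(PySem.Set.contains s (info.getD "id" 0))) = true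
      · -- the first info with this id claims its whole bucket
        rw [Bool.and_eq_true] at hc
        obtain ⟨hne', hws'⟩ := hc
        have hc : (!(bk.getD (info.getD "id" 0) []).isEmpty
            && !(PySem.Set.contains s (info.getD "id" 0))) = true := by
          rw [Bool.and_eq_true]; exact ⟨hne', hws'⟩
        have hws : PySem.Set.contains s (info.getD "id" 0) = false := by
          simpa using hws'
        simp only [outRecB, hid, if_true, hc]
        have hscan : joinScan (info.getD "id" 0) (info :: rest) = some info := by
          simp [joinScan, hid]
        -- split the surviving keyed prices into key-w ones and the rest
        have hsplit := List.filter_append_perm (fun p => p.1 == info.getD "id" 0)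
          ((keyedP ps).filter (fun p => !(PySem.Set.contains s p.1)))
        -- the key-w part equals the bucket, merged with this info
        have hX : (((keyedP ps).filter (fun p => !(PySem.Set.contains s p.1))).filter
              (fun p => p.1 == info.getD "id" 0)).filterMap
              (fun p => (joinScan p.1 (info :: rest)).map
                (fun i => (p.2.1, p.2.2.update i.items)))
            = (bk.getD (info.getD "id" 0) []).map
                (fun q => (q.1, q.2.update info.items)) := by
          rw [List.filter_filter]
          have heq1 : (keyedP ps).filter
              (fun p => (p.1 == info.getD "id" 0) && !(PySem.Set.contains s p.1))
              = (keyedP ps).filter (fun p => p.1 == info.getD "id" 0) := by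
            apply List.filter_congr
            intro p _
            have hnm : info.getD "id" 0 ∉ s := fun hm =>
              absurd ((PySem.Set.contains_iff s (info.getD "id" 0)).mpr hm) (by rw [hws]; exact Bool.false_ne_true)
            by_cases h : p.1 = info.getD "id" 0
            · simp [h, hnm]
            · simp [h]
          rw [heq1]
          have hmemF : ∀ p ∈ (keyedP ps).filter (fun p => p.1 == info.getD "id" 0),
              (joinScan p.1 (info :: rest)).map
                  (fun i => (p.2.1, p.2.2.update i.items))
                = some (p.2.1, p.2.2.update info.items) := by
            intro p hp
            have hkey : p.1 = info.getD "id" 0 := by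
              simpa using (List.mem_filter.mp hp).2
            rw [hkey, hscan, Option.map_some]
          rw [List.filterMap_congr hmemF, filterMap_some_eq_map, hbk, List.map_map]
          rfl
        -- the rest: exactly the survivors once this id is seen
        have hY : ((((keyedP ps).filter (fun p => !(PySem.Set.contains s p.1))).filter
              (fun p => !(p.1 == info.getD "id" 0))).filterMap
              (fun p => (joinScan p.1 (info :: rest)).map
                (fun i => (p.2.1, p.2.2.update i.items))))
            = (((keyedP ps).filter
                (fun p => !(PySem.Set.contains (PySem.Set.add s (info.getD "id" 0)) p.1))).filterMap
              (fun p => (joinScan p.1 rest).map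
                (fun i => (p.2.1, p.2.2.update i.items)))) := by
          rw [List.filter_filter]
          have heq2 : (keyedP ps).filter
              (fun p => !(p.1 == info.getD "id" 0) && !(PySem.Set.contains s p.1))
              = (keyedP ps).filter
                (fun p => !(PySem.Set.contains (PySem.Set.add s (info.getD "id" 0)) p.1)) := by
            apply List.filter_congr
            intro p _
            rw [contains_add_eq, Bool.not_or, Bool.and_comm]
          rw [heq2]
          apply List.filterMap_congr
          intro p hp
          have hnm : PySem.Set.contains (PySem.Set.add s (info.getD "id" 0)) p.1 = false := by
            have := (List.mem_filter.mp hp).2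
            simpa using this
          have hne : ¬ p.1 = info.getD "id" 0 := by
            intro h
            have : p.1 ∈ PySem.Set.add s (info.getD "id" 0) :=
              (PySem.Set.mem_add s (info.getD "id" 0) p.1).mpr (Or.inr h)
            rw [← PySem.Set.contains_iff] at this
            rw [hnm] at this
            exact Bool.false_ne_true this
          rw [joinScan_skip]
          rintro ⟨-, hv⟩
          exact hne hv.symm
        refine List.Perm.trans (List.Perm.append (List.Perm.of_eq hX.symm) ?_)
          (List.Perm.trans (List.Perm.of_eq (List.filterMap_append).symm)
            (hsplit.filterMap _))
        rw [hY]
        exact ih (PySem.Set.add s (info.getD "id" 0))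
      · -- skipped: bucket empty or id already seen — nothing changes on either side
        have hcong : ∀ p ∈ (keyedP ps).filter (fun p => !(PySem.Set.contains s p.1)),
            (joinScan p.1 (info :: rest)).map (fun i => (p.2.1, p.2.2.update i.items))
              = (joinScan p.1 rest).map (fun i => (p.2.1, p.2.2.update i.items)) := by
          intro p hp
          rw [joinScan_skip]
          rintro ⟨-, hv⟩
          have hsv : PySem.Set.contains s p.1 = false := by
            have := (List.mem_filter.mp hp).2
            simpa using this
          have hmem : p ∈ keyedP ps := List.mem_of_mem_filter hp
          -- then the bucket for this id is nonempty and the id unseen: contradiction with hc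
          apply hc
          have hbne : ((keyedP ps).filter (fun p => p.1 == info.getD "id" 0)) ≠ [] := by
            intro hnil
            have : p ∈ (keyedP ps).filter (fun p => p.1 == info.getD "id" 0) :=
              List.mem_filter.mpr ⟨hmem, by simp [hv]⟩
            rw [hnil] at this
            exact (List.not_mem_nil) this
          have h1 : (bk.getD (info.getD "id" 0) []).isEmpty = false := by
            rw [hbk]
            rw [Bool.eq_false_iff]
            intro hE
            exact hbne (List.map_eq_nil_iff.mp (List.isEmpty_iff.mp hE))
          have h2 : PySem.Set.contains s (info.getD "id" 0) = false := by
            rw [hv]; exact hsv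
          rw [h1, h2]
          rfl
        rw [List.filterMap_congr hcong]
        simp only [outRecB, hid, if_true, hc, if_false]
        exact ih s
    · -- info without 'id': ignored on both sides
      have hcong : ∀ p ∈ (keyedP ps).filter (fun p => !(PySem.Set.contains s p.1)),
          (joinScan p.1 (info :: rest)).map (fun i => (p.2.1, p.2.2.update i.items))
            = (joinScan p.1 rest).map (fun i => (p.2.1, p.2.2.update i.items)) := by
        intro p _
        rw [joinScan_skip]
        rintro ⟨h, -⟩; exact hid h
      rw [List.filterMap_congr hcong]
      simp only [outRecB, hid]
      simp only [Bool.false_eq_true, if_false]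
      exact ih s

-- positions in joinLA are strictly increasing (it filters the enumeration of ps)
lemma pairwise_joinLA (infos ps : List (PySem.Dict String Int)) :
    (joinLA infos ps).Pairwise (fun a b => a.1 < b.1) := by
  unfold joinLA keyedP
  rw [List.filterMap_filterMap, List.pairwise_filterMap]
  have hfst : ∀ (q : Int × PySem.Dict String Int) (y : Int × PySem.Dict String Int),
      ((if q.2.contains "matchupId" then some (q.2.getD "matchupId" 0, q) else none).bind
        (fun p => (joinScan p.1 infos).map (fun i => (p.2.1, p.2.2.update i.items))))
        = some y → y.1 = q.1 := by
    intro q y h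
    by_cases hcq : q.2.contains "matchupId" = true
    · rw [if_pos hcq] at h
      rw [show ((some (q.2.getD "matchupId" 0, q)).bind
          (fun p => (joinScan p.1 infos).map (fun i => (p.2.1, p.2.2.update i.items))))
          = (joinScan (q.2.getD "matchupId" 0) infos).map
            (fun i => (q.1, q.2.update i.items)) from rfl] at h
      cases hscan : joinScan (q.2.getD "matchupId" 0) infos <;> rw [hscan] at h
      · exact absurd h (by simp)
      · rw [Option.map_some] at h
        obtain rfl := Option.some.inj h
        rfl
    · rw [if_neg hcq] at h
      exact absurd h (by simp)
  refine List.Pairwise.imp ?_ (PySem.List.pairwise_lt_enumerate ps 0)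
  intro a b hab y hy y' hy'
  rw [hfst a y hy, hfst b y' hy']
  exact hab

-- ===== VERDICT (by name: the statement is the Claim_ definition above) =====
theorem join_price_info_spec : Claim_equal_join_price_info := by
  intro price_objects info_objects _
  unfold Spec_join_price_info join_price_info join_price_info_alt
  simp only []
  set pds := price_objects.map PySem.Dict.ofList with hpds
  set ids := info_objects.map PySem.Dict.ofList with hids
  set bk := (PySem.List.enumerate pds).foldl
      (fun d q => if q.2.contains "matchupId" then
          d.modify (q.2.getD "matchupId" 0) [] (· ++ [q]) else d)
      PySem.Dict.empty with hbkdef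
  have hbk : ∀ v, bk.getD v [] = ((keyedP pds).filter (fun p => p.1 == v)).map (·.2) :=
    fun v => buckets_getD pds v
  have hout : (ids.foldl (fun st info =>
      if info.contains "id" then
        let v := info.getD "id" 0
        let pl := bk.getD v []
        if !pl.isEmpty && !(PySem.Set.contains st.1 v) then
          (PySem.Set.add st.1 v, st.2 ++ pl.map (fun q => (q.1, q.2.update info.items)))
        else st
      else st)
    ((PySem.Set.empty : PySem.Set Int), ([] : List (Int × PySem.Dict String Int)))).2
      = outRecB bk ids PySem.Set.empty := by
    simpa using foldl_outRecB bk ids PySem.Set.empty []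
  have hperm : (joinLA ids pds).Perm (outRecB bk ids PySem.Set.empty) := by
    refine List.Perm.symm ?_
    have h := outRecB_perm pds bk hbk ids PySem.Set.empty
    have hfe : ((keyedP pds).filter
        (fun p => !(PySem.Set.contains PySem.Set.empty p.1))) = keyedP pds := by
      apply List.filter_eq_self.mpr
      intro p _
      rfl
    rw [hfe] at h
    exact h
  have hsorted : PySem.List.sorted
      ((ids.foldl (fun st info =>
        if info.contains "id" then
          let v := info.getD "id" 0
          let pl := bk.getD v []
          if !pl.isEmpty && !(PySem.Set.contains st.1 v) then
            (PySem.Set.add st.1 v, st.2 ++ pl.map (fun q => (q.1, q.2.update info.items)))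
          else st
        else st)
      ((PySem.Set.empty : PySem.Set Int), ([] : List (Int × PySem.Dict String Int)))).2)
      (fun q => q.1) false = joinLA ids pds := by
    rw [hout]
    exact PySem.List.sorted_eq_of_perm_of_pairwise_lt _ _ _ hperm (pairwise_joinLA ids pds)
  rw [hsorted, A_characterisation]
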